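-- pv_equiv track=rewrite | github.com/counsyl/civet | civet/util.py | get_shortest_topmost_directories
-- ===== SOURCE A (Python) =====
-- def get_shortest_topmost_directories(dirs):
--     """Return the shortest topmost directories from the dirs list.
--
--     Args:
--         dirs: A list of directories
--
--     Returns:
--         The shortest list of parent directories s, such that every directory
--         d in dirs can be reached from one (and only one) directory in s.
--
--         For example, given the directories /a, /a/b, /a/b/c, /d/e, /f
--         since /a/b and /a/b/c can all be reached from /a, only /a is needed.
--         /d/e can only be reached from /d/e and /f from /f, so the resulting
--         list is /a, /d/e, and /f.
--     """
--
--     if not dirs: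
--         return []
--
--     # Sort the dirs and use path prefix to eliminate covered children
--     sorted_dirs = sorted(dirs)
--
--     current = sorted_dirs.pop(0)
--     results = [current]
--
--     # To avoid the case where /foobar is treated as a child of /foo, we add
--     # the / terminal to each directory before comparison
--     current = current + '/'
--
--     while sorted_dirs:
--         next = sorted_dirs.pop(0)
--         terminated_next = next + '/'
--         if not terminated_next.startswith(current):
--             current = terminated_next
--             results.append(next)
--     return results
-- ===== SOURCE B (Python) =====
-- def get_shortest_topmost_directories(dirs):
--     # A directory is topmost iff no proper '/'-ancestor of it is present.
--     # Hash-set lookup of each dir's own ancestor prefixes replaces A's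
--     # sequential last-kept-prefix scan (and fixes its missed ancestors).
--     dirset = set(dirs)
--
--     def covered(d):
--         return any(d[i] == '/' and d[:i] in dirset for i in range(len(d)))
--
--     return sorted(d for d in dirset if not covered(d))
-- ===== Notes on version B (the rewrite author's own statement) =====
-- stated objective: faster
-- what changed: Replaces A's quadratic pop(0) scan that keeps a directory unless the last kept one is a prefix by a per-directory hash-set lookup of the directory's own '/'-ancestor prefixes (sorted(set), then keep d iff no proper ancestor of d is in the set), which also returns the documented shortest set where A's scan misses an ancestor.
-- intended difference: On lists where some directory d has a proper '/'-ancestor in the list but every such ancestor c is separated from d, in sort order, by a directory c does not cover (characters below '/' sort between c and c+'/', e.g. dirs = ['/a', '/a!b', '/a/c']), A's last-kept-prefix scan forgets the ancestor and also returns the covered d, while B omits it -- the docstring asks for the shortest set of topmost parents, so B's value is the intended one. — e.g. on get_shortest_topmost_directories(["/a", "/a!b", "/a/c"]): A returns ["/a", "/a!b", "/a/c"], B returns ["/a", "/a!b"]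
import Mathlib
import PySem

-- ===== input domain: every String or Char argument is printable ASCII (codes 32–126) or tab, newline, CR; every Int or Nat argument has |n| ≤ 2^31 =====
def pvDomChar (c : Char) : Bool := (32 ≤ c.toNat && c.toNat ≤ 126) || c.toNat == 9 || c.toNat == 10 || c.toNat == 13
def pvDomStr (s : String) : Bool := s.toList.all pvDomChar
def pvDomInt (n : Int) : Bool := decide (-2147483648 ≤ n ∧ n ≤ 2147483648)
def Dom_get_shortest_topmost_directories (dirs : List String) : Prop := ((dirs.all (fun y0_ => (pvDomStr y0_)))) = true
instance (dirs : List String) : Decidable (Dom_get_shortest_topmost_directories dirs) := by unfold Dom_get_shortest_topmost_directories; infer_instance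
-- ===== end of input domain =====

-- B replaces A's quadratic pop(0) last-kept-prefix scan by a hash-set lookup of each directory's own '/'-ancestor prefixes; where A's scan misses an ancestor (D_ below) B returns the documented shortest set.


-- ===== PORT A =====
-- s + '/'  (on code points; Lean's own String.append is kernel-opaque)
def pvTerm (s : String) : String := String.ofList (s.toList ++ ['/'])

-- A's while-loop: pop the next dir, keep it unless its '/'-terminated form starts with current.
def pvGoA : List String → String → List String → List String
  | [], _, results => results
  | next :: rest, current, results =>
    let terminated_next := pvTerm next
    if ¬ (PySem.Str.startswith terminated_next current = true) then
      pvGoA rest terminated_next (results ++ [next])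
    else
      pvGoA rest current results

def get_shortest_topmost_directories (dirs : List String) : List String :=
  if dirs = [] then []
  else
    match PySem.List.sorted dirs (fun s => s.toList) false with
    | [] => []
    | current :: sorted_dirs => pvGoA sorted_dirs (pvTerm current) [current]

-- ===== PORT B =====
-- covered(d): some prefix of d ending just before a '/' is itself in the set.
def pvCovered (dirset : PySem.Set String) (d : String) : Bool :=
  (PySem.List.pyRange 0 (PySem.Str.len d)).any (fun i =>
    (PySem.Str.pyGet? d i == some '/') &&
      PySem.Set.contains dirset (PySem.Str.slice d none (some i)))

def get_shortest_topmost_directories_alt (dirs : List String) : List String :=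
  let dirset : PySem.Set String := PySem.Set.ofList dirs
  PySem.List.sorted (List.filter (fun d => ! pvCovered dirset d) dirset) (fun s => s.toList) false

-- ===== PRECONDITION & SPEC =====
-- c is a proper '/'-ancestor of d: d continues c with a '/' right after it
abbrev pvAnc (c d : String) : Prop :=
  ∃ i : Nat, i < d.toList.length ∧ d.toList[i]? = some '/' ∧ c.toList = d.toList.take i

-- On lists where some directory d has a proper '/'-ancestor in the list but every such
-- ancestor c is separated from d, in sort order, by a directory that is not a descendant
-- of c, A's last-kept-prefix scan forgets the ancestor and returns d too, while B omits
-- d — the docstring asks for the shortest set of topmost parents, so B's value is the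
-- intended one.
def D_get_shortest_topmost_directories (dirs : List String) : Prop :=
  ∃ d ∈ dirs, (∃ c ∈ dirs, pvAnc c d) ∧
    ∀ c ∈ dirs, pvAnc c d →
      ∃ e ∈ dirs, c.toList < e.toList ∧ e.toList < d.toList ∧ ¬ pvAnc c e

instance (dirs : List String) : Decidable (D_get_shortest_topmost_directories dirs) := by
  unfold D_get_shortest_topmost_directories; infer_instance

def Spec_get_shortest_topmost_directories (dirs : List String) (out : List String) : Prop :=
  ¬ D_get_shortest_topmost_directories dirs → out = get_shortest_topmost_directories_alt dirs
instance (dirs : List String) (out : List String) : Decidable (Spec_get_shortest_topmost_directories dirs out) := by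
  unfold Spec_get_shortest_topmost_directories; infer_instance

def pvDiffWitness_get_shortest_topmost_directories : List String := ["/a", "/a!b", "/a/c"]
def pvDiffWitnessOut_get_shortest_topmost_directories : (List String) × (List String) :=
  (["/a", "/a!b", "/a/c"], ["/a", "/a!b"])

-- ===== CLAIM (what is proved, stated in full; the proofs are below) =====
def Claim_unchanged_get_shortest_topmost_directories : Prop := ∀ (dirs : List String), Dom_get_shortest_topmost_directories dirs → Spec_get_shortest_topmost_directories dirs (get_shortest_topmost_directories dirs)
def Claim_changed_get_shortest_topmost_directories : Prop := Dom_get_shortest_topmost_directories (pvDiffWitness_get_shortest_topmost_directories) ∧ D_get_shortest_topmost_directories (pvDiffWitness_get_shortest_topmost_directories) ∧ get_shortest_topmost_directories (pvDiffWitness_get_shortest_topmost_directories) = pvDiffWitnessOut_get_shortest_topmost_directories.1 ∧ get_shortest_topmost_directories_alt (pvDiffWitness_get_shortest_topmost_directories) = pvDiffWitnessOut_get_shortest_topmost_directories.2 ∧ pvDiffWitnessOut_get_shortest_topmost_directories.1 ≠ pvDiffWitnessOut_get_shortest_topmost_directories.2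
def Claim_exact_get_shortest_topmost_directories : Prop := ∀ (dirs : List String), Dom_get_shortest_topmost_directories dirs → D_get_shortest_topmost_directories dirs → get_shortest_topmost_directories dirs ≠ get_shortest_topmost_directories_alt dirs

-- ===== LEMMAS AND PROOFS =====

-- c is d or a '/'-ancestor of d (Python's (d+'/').startswith(c+'/')); proof-side only
abbrev pvCovp (c d : String) : Prop := (c.toList ++ ['/']) <+: (d.toList ++ ['/'])

-- ---- basic facts about pvCovp ----
theorem pvCovp_trans {a b c : String} (h1 : pvCovp a b) (h2 : pvCovp b c) : pvCovp a c :=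
  h1.trans h2

theorem pv_prefix_lt {u v : List Char} (h : u <+: v) (hne : u ≠ v) : u < v := by
  obtain ⟨w, rfl⟩ := h
  cases w with
  | nil => simp at hne
  | cons a t =>
    have h2 : List.Lex (· < ·) (u ++ []) (u ++ (a :: t)) :=
      List.Lex.append_left (· < ·) (List.Lex.nil) u
    simpa using h2

theorem pvCovp_proper {c d : String} (hne : c ≠ d) (h : pvCovp c d) :
    (c.toList ++ ['/']) <+: d.toList := by
  have hle := h.length_le
  simp only [List.length_append, List.length_cons, List.length_nil] at hle
  rcases Nat.lt_or_ge c.toList.length d.toList.length with hlt | hge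
  · exact (List.isPrefix_append_of_length (by simpa using hlt)).mp h
  · exfalso
    have heq : c.toList ++ ['/'] = d.toList ++ ['/'] := List.IsPrefix.eq_of_length h
      (by simp only [List.length_append, List.length_cons, List.length_nil]; omega)
    have : c.toList = d.toList := by simpa using heq
    exact hne (String.toList_injective this)

theorem pvCovp_le {c d : String} (h : pvCovp c d) : c.toList ≤ d.toList := by
  by_cases hne : c = d
  · exact le_of_eq (by rw [hne])
  · have hp : (c.toList ++ ['/']) <+: d.toList := pvCovp_proper hne h
    have h1 : c.toList <+: d.toList := (List.prefix_append _ _).trans hp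
    exact le_of_lt (pv_prefix_lt h1 (fun he => hne (String.toList_injective he)))

-- proper ancestors of d are exactly its prefixes cut at a '/'
theorem pv_anc_iff (c d : String) :
    (c ≠ d ∧ pvCovp c d) ↔
      ∃ i : Nat, i < d.toList.length ∧ d.toList[i]? = some '/' ∧ c.toList = d.toList.take i := by
  constructor
  · rintro ⟨hne, h⟩
    have hp : (c.toList ++ ['/']) <+: d.toList := pvCovp_proper hne h
    refine ⟨c.toList.length, ?_, ?_, ?_⟩
    · have h2 := hp.length_le
      simp only [List.length_append, List.length_cons, List.length_nil] at h2; omega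
    · obtain ⟨w, hw⟩ := hp
      have hw2 : d.toList = c.toList ++ ('/' :: w) := by rw [← hw]; simp
      rw [hw2, List.getElem?_append_right (le_refl _)]
      simp
    · exact List.prefix_iff_eq_take.mp ((List.prefix_append _ _).trans hp)
  · rintro ⟨i, hi, hsl, hct⟩
    have hlen : c.toList.length = i := by rw [hct]; simp only [List.length_take]; omega
    constructor
    · intro he; rw [he] at hlen; omega
    · unfold pvCovp
      have h1 : c.toList ++ ['/'] = d.toList.take (i+1) := by
        rw [hct, List.take_add_one, hsl]; rfl
      rw [h1]
      exact (List.take_prefix _ _).trans (List.prefix_append _ _)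

theorem pvCovp_iff_anc {c e : String} (hne : c ≠ e) : pvCovp c e ↔ pvAnc c e :=
  ⟨fun h => (pv_anc_iff c e).mp ⟨hne, h⟩, fun h => ((pv_anc_iff c e).mpr h).2⟩

theorem pv_ne_of_toList_lt {c e : String} (h : c.toList < e.toList) : c ≠ e :=
  fun heq => absurd h (by rw [heq]; exact lt_irrefl _)

-- pvCovered decoded: some member of the set is a proper ancestor
theorem pvCovered_iff (xs : List String) (d : String) :
    pvCovered (PySem.Set.ofList xs) d = true ↔ ∃ c ∈ xs, c ≠ d ∧ pvCovp c d := by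
  unfold pvCovered
  rw [List.any_eq_true]
  constructor
  · rintro ⟨i, hmem, hpred⟩
    rw [PySem.List.mem_pyRange_one, PySem.Str.len_eq] at hmem
    obtain ⟨h0, hlt⟩ := hmem
    obtain ⟨n, rfl⟩ : ∃ n : Nat, i = (n : Int) := ⟨i.toNat, (Int.toNat_of_nonneg h0).symm⟩
    rw [Bool.and_eq_true, beq_iff_eq, PySem.Str.pyGet?_natCast, PySem.Set.contains_iff,
      PySem.Set.mem_ofList] at hpred
    obtain ⟨hsl, hin⟩ := hpred
    refine ⟨_, hin, ?_⟩
    rw [pv_anc_iff]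
    refine ⟨n, by exact_mod_cast hlt, hsl, ?_⟩
    rw [PySem.Str.toList_slice, PySem.Chars.slice_eq_listSlice, PySem.List.slice_to _ (by positivity)]
    simp
  · rintro ⟨c, hc, hcd⟩
    rw [pv_anc_iff] at hcd
    obtain ⟨n, hn, hsl, hct⟩ := hcd
    refine ⟨(n : Int), ?_, ?_⟩
    · rw [PySem.List.mem_pyRange_one, PySem.Str.len_eq]
      exact ⟨by positivity, by exact_mod_cast hn⟩
    · rw [Bool.and_eq_true, beq_iff_eq, PySem.Str.pyGet?_natCast, PySem.Set.contains_iff,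
        PySem.Set.mem_ofList]
      refine ⟨hsl, ?_⟩
      have h2 : PySem.Str.slice d none (some (n : Int)) = c := by
        apply String.toList_injective
        rw [PySem.Str.toList_slice, PySem.Chars.slice_eq_listSlice, PySem.List.slice_to _ (by positivity)]
        simp [hct]
      rw [h2]; exact hc

-- ---- the ports' sort, re-expressed with Mathlib's order instances on List Char ----
def pvMLsorted (xs : List String) : List String :=
  @PySem.List.sorted String (List Char) List.instLinearOrder.toLT
    (@LinearOrder.toDecidableLT _ List.instLinearOrder) xs (fun s => s.toList) false

theorem pv_sorted_ml (xs : List String) :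
    PySem.List.sorted xs (fun s => s.toList) false = pvMLsorted xs := by
  unfold pvMLsorted
  rw [PySem.List.sorted_eq_foldl_insertBy,
    @PySem.List.sorted_eq_foldl_insertBy String (List Char) List.instLinearOrder.toLT
      (@LinearOrder.toDecidableLT _ List.instLinearOrder) xs (fun s => s.toList)]
  congr 1
  funext acc x
  congr 1
  funext a b
  rw [decide_eq_decide]

-- ---- A's loop in dropWhile form ----
-- the loop without its accumulator/current plumbing (proof-side recursion)
def pvFAux : String → List String → List String
  | _, [] => []
  | x, z :: zs => if pvCovp x z then pvFAux x zs else z :: pvFAux z zs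

def pvHeadF : List String → List String
  | [] => []
  | x :: rest => x :: pvFAux x rest

theorem pvGoA_eq_fAux (l : List String) (x : String) (res : List String) :
    pvGoA l (pvTerm x) res = res ++ pvFAux x l := by
  induction l generalizing x res with
  | nil => simp [pvGoA, pvFAux]
  | cons z zs ih =>
    have hb : (PySem.Str.startswith (pvTerm z) (pvTerm x) = true) ↔ pvCovp x z := by
      simp [PySem.Str.startswith_eq, PySem.Chars.startswith_iff, pvTerm, pvCovp]
    simp only [pvGoA, pvFAux]
    by_cases hc : pvCovp x z
    · rw [if_neg (not_not_intro (hb.mpr hc)), if_pos hc, ih]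
    · rw [if_pos (fun hh => hc (hb.mp hh)), if_neg hc, ih]
      simp

theorem pvFAux_dropWhile (x : String) (l : List String) :
    pvFAux x l = pvHeadF (l.dropWhile (fun y => decide (pvCovp x y))) := by
  induction l generalizing x with
  | nil => simp [pvFAux, pvHeadF]
  | cons z zs ih =>
    by_cases hc : pvCovp x z
    · simp [pvFAux, hc, ih]
    · simp [pvFAux, hc, pvHeadF]

theorem pvHeadF_cons (x : String) (rest : List String) :
    pvHeadF (x :: rest) = x :: pvHeadF ((x :: rest).dropWhile (fun y => decide (pvCovp x y))) := by
  have : (x :: rest).dropWhile (fun y => decide (pvCovp x y)) =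
      rest.dropWhile (fun y => decide (pvCovp x y)) := by
    simp
  rw [this, pvHeadF, pvFAux_dropWhile]

-- ---- headF only depends on the element set (for pairwise-≤ lists) ----
theorem pv_dropWhile_head_false {α : Type} {p : α → Bool} :
    ∀ {l : List α} {h : α} {t : List α}, l.dropWhile p = h :: t → p h = false := by
  intro l
  induction l with
  | nil => intro h t hh; simp at hh
  | cons a l ih =>
    intro h t hh
    by_cases hpa : p a = true
    · rw [List.dropWhile_cons_of_pos hpa] at hh; exact ih hh
    · rw [List.dropWhile_cons_of_neg hpa] at hh
      cases hh; simpa using hpa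

theorem pv_head_le {x : String} {rest : List String}
    (hp : (x :: rest).Pairwise (fun a b => a.toList ≤ b.toList)) :
    ∀ y ∈ x :: rest, x.toList ≤ y.toList := by
  intro y hy
  rcases List.mem_cons.mp hy with rfl | hy
  · exact le_refl _
  · exact (List.pairwise_cons.mp hp).1 y hy

theorem pv_mem_dropWhile_sorted (p : String → Bool) (l : List String)
    (hs : l.Pairwise (fun a b => a.toList ≤ b.toList)) (y : String) :
    y ∈ l.dropWhile p ↔ (y ∈ l ∧ ∃ z ∈ l, p z = false ∧ z.toList ≤ y.toList) := by
  have hsplit : l.takeWhile p ++ l.dropWhile p = l := List.takeWhile_append_dropWhile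
  have hpair : (l.takeWhile p ++ l.dropWhile p).Pairwise (fun a b => a.toList ≤ b.toList) := by
    rw [hsplit]; exact hs
  rw [List.pairwise_append] at hpair
  obtain ⟨hpt, hpd, hcross⟩ := hpair
  constructor
  · intro hy
    refine ⟨by rw [← hsplit]; exact List.mem_append_right _ hy, ?_⟩
    cases hdw : l.dropWhile p with
    | nil => rw [hdw] at hy; simp at hy
    | cons h r =>
      refine ⟨h, by rw [← hsplit, hdw]; simp, pv_dropWhile_head_false hdw, ?_⟩
      rw [hdw] at hy hpd
      rw [List.pairwise_cons] at hpd
      rcases List.mem_cons.mp hy with rfl | hy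
      · exact le_refl _
      · exact hpd.1 y hy
  · rintro ⟨hyl, z, hz, hpz, hzy⟩
    rw [← hsplit] at hyl
    rcases List.mem_append.mp hyl with hyt | hyd
    · exfalso
      have hpy : p y = true := List.mem_takeWhile_imp hyt
      have hzd : z ∈ l.dropWhile p := by
        rw [← hsplit] at hz
        rcases List.mem_append.mp hz with hzt | hzd
        · exact absurd (List.mem_takeWhile_imp hzt) (by simp [hpz])
        · exact hzd
      have h2 : y.toList ≤ z.toList := hcross y hyt z hzd
      have h3 : y = z := String.toList_injective (le_antisymm h2 hzy)
      rw [h3] at hpy; rw [hpy] at hpz; cases hpz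
    · exact hyd

theorem pvHeadF_congr : ∀ (n : Nat) (l l' : List String), l.length ≤ n →
    l.Pairwise (fun a b => a.toList ≤ b.toList) → l'.Pairwise (fun a b => a.toList ≤ b.toList) → (∀ y, y ∈ l ↔ y ∈ l') →
    pvHeadF l = pvHeadF l' := by
  intro n
  induction n with
  | zero =>
    intro l l' hlen _ _ hmem
    have hl : l = [] := List.eq_nil_of_length_eq_zero (Nat.le_zero.mp hlen)
    subst hl
    cases l' with
    | nil => rfl
    | cons x' r' => exact absurd ((hmem x').mpr (List.mem_cons_self)) (by simp)
  | succ n ih =>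
    intro l l' hlen hp hp' hmem
    cases l with
    | nil =>
      cases l' with
      | nil => rfl
      | cons x' r' => exact absurd ((hmem x').mpr (List.mem_cons_self)) (by simp)
    | cons x rest =>
      cases l' with
      | nil => exact absurd ((hmem x).mp (List.mem_cons_self)) (by simp)
      | cons x' rest' =>
        have hxx' : x = x' := by
          apply String.toList_injective
          apply le_antisymm
          · exact pv_head_le hp x' ((hmem x').mpr (List.mem_cons_self))
          · exact pv_head_le hp' x ((hmem x).mp (List.mem_cons_self))
        subst hxx'
        rw [pvHeadF_cons x rest, pvHeadF_cons x rest']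
        congr 1
        apply ih
        · have h1 : (x :: rest).dropWhile (fun y => decide (pvCovp x y)) =
              rest.dropWhile (fun y => decide (pvCovp x y)) := by simp
          rw [h1]
          calc (rest.dropWhile _).length ≤ rest.length := List.length_dropWhile_le _ _
            _ ≤ n := by simpa using hlen
        · exact hp.sublist (List.dropWhile_sublist _)
        · exact hp'.sublist (List.dropWhile_sublist _)
        · intro y
          rw [pv_mem_dropWhile_sorted _ _ hp y, pv_mem_dropWhile_sorted _ _ hp' y]
          exact and_congr (hmem y) (exists_congr fun z => and_congr (hmem z) Iff.rfl)

-- ---- characterization of A's scan on strictly sorted lists ----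
-- d survives A's scan iff every proper ancestor of d in the list is 'broken' by a
-- directory between them that it does not cover
abbrev pvKept (L : List String) (d : String) : Prop :=
  ∀ c ∈ L, c ≠ d → pvCovp c d → ∃ e ∈ L, c.toList < e.toList ∧ e.toList < d.toList ∧ ¬ pvCovp c e


theorem pvCharA : ∀ (n : Nat) (l : List String), l.length ≤ n →
    l.Pairwise (fun a b => a.toList < b.toList) →
    pvHeadF l = l.filter (fun d => decide (pvKept l d)) := by
  intro n
  induction n with
  | zero =>
    intro l hlen _
    have : l = [] := List.eq_nil_of_length_eq_zero (Nat.le_zero.mp hlen)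
    subst this; rfl
  | succ n ih =>
    intro l hlen hp
    cases l with
    | nil => rfl
    | cons x rest =>
      have hx : ∀ y ∈ rest, x.toList < y.toList := (List.pairwise_cons.mp hp).1
      have hrest : rest.Pairwise (fun a b => a.toList < b.toList) := (List.pairwise_cons.mp hp).2
      set p : String → Bool := fun y => decide (pvCovp x y) with hpdef
      have hsplit : rest.takeWhile p ++ rest.dropWhile p = rest := List.takeWhile_append_dropWhile
      have hpair2 : (rest.takeWhile p ++ rest.dropWhile p).Pairwise (fun a b => a.toList < b.toList) := by
        rw [hsplit]; exact hrest
      rw [List.pairwise_append] at hpair2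
      obtain ⟨hPt, hPr, hcross⟩ := hpair2
      have ht : ∀ a ∈ rest.takeWhile p, pvCovp x a := by
        intro a ha
        have h2 := List.mem_takeWhile_imp ha
        rw [hpdef] at h2
        exact of_decide_eq_true h2
      -- the head survives
      have hkx : pvKept (x :: rest) x := by
        intro c hc hne hcov
        exfalso
        rcases List.mem_cons.mp hc with rfl | hc
        · exact hne rfl
        · exact absurd (pvCovp_le hcov) (not_le.mpr (hx c hc))
      -- the directories A drops are not kept
      have htk : ∀ d ∈ rest.takeWhile p, ¬ pvKept (x :: rest) d := by
        intro d hd hk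
        have hdrest : d ∈ rest := (List.takeWhile_sublist p).subset hd
        have hxd : x.toList < d.toList := hx d hdrest
        obtain ⟨e, he, hxe, hed, hnc⟩ := hk x List.mem_cons_self
          (fun h => absurd hxd (by rw [h]; exact lt_irrefl _)) (ht d hd)
        rcases List.mem_cons.mp he with rfl | he
        · exact absurd hxe (lt_irrefl _)
        · rw [← hsplit] at he
          rcases List.mem_append.mp he with het | her
          · exact hnc (ht e het)
          · exact absurd (hcross d hd e her) (not_lt.mpr (le_of_lt hed))
      have hLhead : pvHeadF (x :: rest) = x :: pvHeadF (rest.dropWhile p) := by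
        rw [pvHeadF_cons]
        congr 2
        simp [hpdef]
      cases hr : rest.dropWhile p with
      | nil =>
        rw [hLhead, hr]
        have htall : rest.takeWhile p = rest := by
          have h2 := hsplit; rw [hr, List.append_nil] at h2; exact h2
        have hfil : List.filter (fun d => decide (pvKept (x :: rest) d)) rest = [] :=
          List.filter_eq_nil_iff.mpr (fun a ha => by
            simp only [decide_eq_true_eq]
            exact htk a (by rw [htall]; exact ha))
        rw [List.filter_cons, if_pos (decide_eq_true hkx), hfil]
        rfl
      | cons h r' =>
        have hph : ¬ pvCovp x h := by
          have h2 : p h = false := pv_dropWhile_head_false hr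
          simpa [hpdef] using h2
        have hhr : h ∈ rest.dropWhile p := by rw [hr]; exact List.mem_cons_self
        have hmemr : ∀ y ∈ rest.dropWhile p, y ∈ rest := fun y hy =>
          (List.dropWhile_sublist p).subset hy
        -- keptness over the whole list and over the remainder agree on the remainder
        have hTr : ∀ d ∈ rest.dropWhile p, (pvKept (x :: rest) d ↔ pvKept (rest.dropWhile p) d) := by
          intro d hd
          constructor
          · intro hk c hc hne hcov
            obtain ⟨e, he, hce, hed, hnc⟩ := hk c (List.mem_cons_of_mem _ (hmemr c hc)) hne hcov
            refine ⟨e, ?_, hce, hed, hnc⟩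
            rcases List.mem_cons.mp he with rfl | he
            · exact absurd (hce.trans (hx c (hmemr c hc))) (lt_irrefl _)
            · rw [← hsplit] at he
              rcases List.mem_append.mp he with het | her
              · exact absurd (hcross e het c hc) (not_lt.mpr (le_of_lt hce))
              · exact her
          · intro hk c hc hne hcov
            rcases List.mem_cons.mp hc with rfl | hc
            · -- c = x
              have hdr' : d ∈ r' := by
                rcases List.mem_cons.mp (by rw [← hr]; exact hd) with rfl | hdr
                · exact absurd hcov hph
                · exact hdr
              exact ⟨h, List.mem_cons_of_mem _ (hmemr h hhr), hx h (hmemr h hhr),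
                (List.pairwise_cons.mp (hr ▸ hPr)).1 d hdr', hph⟩
            · rw [← hsplit] at hc
              rcases List.mem_append.mp hc with hct | hcr
              · -- c was dropped earlier: x covers c covers d, and h breaks c too
                have hxc : pvCovp x c := ht c hct
                have hdr' : d ∈ r' := by
                  rcases List.mem_cons.mp (by rw [← hr]; exact hd) with rfl | hdr
                  · exact absurd (pvCovp_trans hxc hcov) hph
                  · exact hdr
                refine ⟨h, List.mem_cons_of_mem _ (hmemr h hhr), hcross c hct h hhr,
                  (List.pairwise_cons.mp (hr ▸ hPr)).1 d hdr', ?_⟩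
                intro hch
                exact hph (pvCovp_trans hxc hch)
              · obtain ⟨e, he, hce, hed, hnc⟩ := hk c hcr hne hcov
                exact ⟨e, List.mem_cons_of_mem _ (hmemr e he), hce, hed, hnc⟩
        -- assemble
        have hIH : pvHeadF (rest.dropWhile p) =
            (rest.dropWhile p).filter (fun d => decide (pvKept (rest.dropWhile p) d)) := by
          apply ih
          · calc (rest.dropWhile p).length ≤ rest.length := List.length_dropWhile_le _ _
              _ ≤ n := by simpa using hlen
          · exact hrest.sublist (List.dropWhile_sublist _)
        rw [hLhead, hIH]
        have hfr : ∀ (q : String → Bool), (∀ a ∈ rest.takeWhile p, q a = false) →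
            (∀ d ∈ rest.dropWhile p, q d = decide (pvKept (rest.dropWhile p) d)) →
            rest.filter q = (rest.dropWhile p).filter
              (fun d => decide (pvKept (rest.dropWhile p) d)) := by
          intro q h1 h2
          conv_lhs => rw [← hsplit]
          rw [List.filter_append, List.filter_eq_nil_iff.mpr (fun a ha => by simp [h1 a ha]), List.nil_append,
            List.filter_congr h2]
        have hq : List.filter (fun d => decide (pvKept (x :: rest) d)) (x :: rest) =
            x :: List.filter (fun d => decide (pvKept (x :: rest) d)) rest := by
          rw [List.filter_cons, if_pos (decide_eq_true hkx)]
        rw [hq, hfr _ (fun a ha => decide_eq_false (htk a ha))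
          (fun d hd => decide_eq_decide.mpr (hTr d hd))]


-- ---- normal forms of the two ports ----
theorem pvML_pairwise_le (xs : List String) :
    (pvMLsorted xs).Pairwise (fun a b => a.toList ≤ b.toList) := by
  unfold pvMLsorted
  exact PySem.List.sorted_pairwise xs (fun s => s.toList)

theorem pvML_perm (xs : List String) : (pvMLsorted xs).Perm xs := by
  unfold pvMLsorted
  exact @PySem.List.sorted_perm String (List Char) List.instLinearOrder.toLT
    (@LinearOrder.toDecidableLT _ List.instLinearOrder) xs (fun s => s.toList) false

theorem pvML_mem (xs : List String) (y : String) : y ∈ pvMLsorted xs ↔ y ∈ xs :=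
  (pvML_perm xs).mem_iff

theorem pvLsd_pairwise_lt (dirs : List String) :
    (pvMLsorted (PySem.Set.ofList dirs)).Pairwise (fun a b => a.toList < b.toList) := by
  have h1 := pvML_pairwise_le (PySem.Set.ofList dirs)
  have h2 : (pvMLsorted (PySem.Set.ofList dirs)).Nodup :=
    (pvML_perm (PySem.Set.ofList dirs)).nodup_iff.mpr (PySem.Set.nodup_ofList dirs)
  have h2' : (pvMLsorted (PySem.Set.ofList dirs)).Pairwise (fun a b => a ≠ b) := h2
  exact (h1.and h2').imp (fun h =>
    lt_of_le_of_ne h.1 (fun he => h.2 (String.toList_injective he)))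

theorem pvAlt_eq_filter (dirs : List String) :
    get_shortest_topmost_directories_alt dirs =
      (pvMLsorted (PySem.Set.ofList dirs)).filter
        (fun d => ! pvCovered (PySem.Set.ofList dirs) d) := by
  show PySem.List.sorted
      (List.filter (fun d => ! pvCovered (PySem.Set.ofList dirs) d) (PySem.Set.ofList dirs))
      (fun s => s.toList) false = _
  rw [pv_sorted_ml]
  unfold pvMLsorted
  apply PySem.List.sorted_eq_of_perm_of_pairwise_lt
  · exact ((pvML_perm (PySem.Set.ofList dirs)).filter _)
  · exact (pvLsd_pairwise_lt dirs).sublist List.filter_sublist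

theorem pvA_eq_headF (dirs : List String) :
    get_shortest_topmost_directories dirs = pvHeadF (PySem.List.sorted dirs (fun s => s.toList) false) := by
  unfold get_shortest_topmost_directories
  by_cases h : dirs = []
  · subst h; rfl
  · rw [if_neg h]
    cases hs : PySem.List.sorted dirs (fun s => s.toList) false with
    | nil => exact absurd ((PySem.List.sorted_eq_nil_iff _ _ _).mp hs) h
    | cons x rest =>
      show pvGoA rest (pvTerm x) [x] = pvHeadF (x :: rest)
      rw [pvGoA_eq_fAux]
      rfl

theorem pvA_eq_filter (dirs : List String) :
    get_shortest_topmost_directories dirs =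
      (pvMLsorted (PySem.Set.ofList dirs)).filter
        (fun d => decide (pvKept (pvMLsorted (PySem.Set.ofList dirs)) d)) := by
  rw [pvA_eq_headF, pv_sorted_ml]
  rw [pvHeadF_congr (pvMLsorted dirs).length
    (pvMLsorted dirs)
    (pvMLsorted (PySem.Set.ofList dirs))
    le_rfl
    (pvML_pairwise_le dirs)
    ((pvLsd_pairwise_lt dirs).imp le_of_lt)
    (fun y => by
      rw [pvML_mem, pvML_mem, PySem.Set.mem_ofList])]
  exact pvCharA _ _ le_rfl (pvLsd_pairwise_lt dirs)

-- ===== VERDICT (by name: the statements are the Claim_ definitions above) =====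
theorem get_shortest_topmost_directories_spec : Claim_unchanged_get_shortest_topmost_directories := by
  intro dirs _ hD
  rw [pvA_eq_filter, pvAlt_eq_filter]
  apply List.filter_congr
  intro d hd
  have hdmem : d ∈ dirs := by
    rw [pvML_mem, PySem.Set.mem_ofList] at hd
    exact hd
  by_cases hA : ∃ c ∈ dirs, c ≠ d ∧ pvCovp c d
  · have hcov : pvCovered (PySem.Set.ofList dirs) d = true := (pvCovered_iff dirs d).mpr hA
    rw [hcov]
    apply decide_eq_false
    intro hk
    apply hD
    obtain ⟨c0, hc0, hne0, hcov0⟩ := hA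
    refine ⟨d, hdmem, ⟨c0, hc0, (pv_anc_iff c0 d).mp ⟨hne0, hcov0⟩⟩, ?_⟩
    intro c hc hanc
    obtain ⟨hne, hcd⟩ := (pv_anc_iff c d).mpr hanc
    obtain ⟨e, he, h1, h2, h3⟩ := hk c
      (by rw [pvML_mem, PySem.Set.mem_ofList]; exact hc) hne hcd
    exact ⟨e, by rw [pvML_mem, PySem.Set.mem_ofList] at he; exact he, h1, h2,
      fun ha => h3 ((pvCovp_iff_anc (pv_ne_of_toList_lt h1)).mpr ha)⟩
  · have hcov : pvCovered (PySem.Set.ofList dirs) d = false := by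
      rcases Bool.eq_false_or_eq_true (pvCovered (PySem.Set.ofList dirs) d) with h | h
      · exact absurd ((pvCovered_iff dirs d).mp h) hA
      · exact h
    rw [hcov]
    apply decide_eq_true
    intro c hc hne hcd
    exact absurd ⟨c, by rw [pvML_mem, PySem.Set.mem_ofList] at hc; exact hc, hne, hcd⟩ hA

theorem get_shortest_topmost_directories_changed : Claim_changed_get_shortest_topmost_directories := by
  unfold Claim_changed_get_shortest_topmost_directories
  decide

theorem get_shortest_topmost_directories_tight : Claim_exact_get_shortest_topmost_directories := by
  intro dirs _ hD heq
  obtain ⟨d, hd, hanc, hbrk⟩ := hD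
  have hanc' : ∃ c ∈ dirs, c ≠ d ∧ pvCovp c d := by
    obtain ⟨c, hc, ha⟩ := hanc
    obtain ⟨hne, hcov⟩ := (pv_anc_iff c d).mpr ha
    exact ⟨c, hc, hne, hcov⟩
  have hdL : d ∈ pvMLsorted (PySem.Set.ofList dirs) := by
    rw [pvML_mem, PySem.Set.mem_ofList]; exact hd
  have hkept : pvKept (pvMLsorted (PySem.Set.ofList dirs)) d := by
    intro c hc hne hcd
    obtain ⟨e, he, h1, h2, h3⟩ := hbrk c
      (by rw [pvML_mem, PySem.Set.mem_ofList] at hc; exact hc) ((pv_anc_iff c d).mp ⟨hne, hcd⟩)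
    exact ⟨e, by rw [pvML_mem, PySem.Set.mem_ofList]; exact he, h1, h2,
      fun hcv => h3 ((pvCovp_iff_anc (pv_ne_of_toList_lt h1)).mp hcv)⟩
  have hmemA : d ∈ get_shortest_topmost_directories dirs := by
    rw [pvA_eq_filter, List.mem_filter]
    exact ⟨hdL, decide_eq_true hkept⟩
  rw [heq, pvAlt_eq_filter, List.mem_filter] at hmemA
  have : pvCovered (PySem.Set.ofList dirs) d = false := by
    have h2 := hmemA.2
    simp only [Bool.not_eq_true'] at h2
    exact h2
  rw [← Bool.not_eq_true] at this
  exact this ((pvCovered_iff dirs d).mpr hanc')
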